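-- pv_equiv track=rewrite | github.com/Zahrinnnnn/Bank-Statement-Parser-Reconciliation-Automation | src/parsers/hlb_parser.py | _detect_table_columns
-- ===== SOURCE A (Python) =====
-- from typing import Optional
--
-- HLB_DATE_COLUMNS = [
--     "date", "transaction date", "txn date", "trans date",
--     "value date", "posting date",
-- ]
--
-- HLB_DESCRIPTION_COLUMNS = [
--     "transaction description", "description", "particulars",
--     "details", "narration", "remarks",
-- ]
--
-- HLB_DEBIT_COLUMNS = [
--     "withdrawal (dr)", "withdrawal(dr)", "withdrawal",
--     "debit", "dr", "debit (rm)", "debit amount",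
-- ]
--
-- HLB_CREDIT_COLUMNS = [
--     "deposit (cr)", "deposit(cr)", "deposit",
--     "credit", "cr", "credit (rm)", "credit amount",
-- ]
--
-- HLB_BALANCE_COLUMNS = [
--     "balance", "running balance", "available balance",
--     "closing balance", "balance (rm)",
-- ]
--
-- HLB_REFERENCE_COLUMNS = [
--     "reference", "ref", "cheque no", "cheque number",
--     "txn ref", "transaction ref",
-- ]
--
-- def _detect_table_columns(header: list[str]) -> dict[str, Optional[int]]:
--     """Use HLB-specific column name lists for table column detection."""
--
--     def find_index(candidate_names: list[str]) -> Optional[int]: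
--         candidate_set = {name.lower().strip() for name in candidate_names}
--         for index, cell in enumerate(header):
--             if cell.lower().strip() in candidate_set:
--                 return index
--         return None
--
--     return {
--         "transaction_date": find_index(HLB_DATE_COLUMNS),
--         "description":      find_index(HLB_DESCRIPTION_COLUMNS),
--         "debit_amount":     find_index(HLB_DEBIT_COLUMNS),
--         "credit_amount":    find_index(HLB_CREDIT_COLUMNS),
--         "amount":           None,
--         "balance":          find_index(HLB_BALANCE_COLUMNS),
--         "reference":        find_index(HLB_REFERENCE_COLUMNS),
--     }
-- ===== SOURCE B (Python) =====
-- from typing import Optional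
--
-- HLB_DATE_COLUMNS = [
--     "date", "transaction date", "txn date", "trans date",
--     "value date", "posting date",
-- ]
--
-- HLB_DESCRIPTION_COLUMNS = [
--     "transaction description", "description", "particulars",
--     "details", "narration", "remarks",
-- ]
--
-- HLB_DEBIT_COLUMNS = [
--     "withdrawal (dr)", "withdrawal(dr)", "withdrawal",
--     "debit", "dr", "debit (rm)", "debit amount",
-- ]
--
-- HLB_CREDIT_COLUMNS = [
--     "deposit (cr)", "deposit(cr)", "deposit",
--     "credit", "cr", "credit (rm)", "credit amount",
-- ]
--
-- HLB_BALANCE_COLUMNS = [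
--     "balance", "running balance", "available balance",
--     "closing balance", "balance (rm)",
-- ]
--
-- HLB_REFERENCE_COLUMNS = [
--     "reference", "ref", "cheque no", "cheque number",
--     "txn ref", "transaction ref",
-- ]
--
-- def _detect_table_columns(header: list[str]) -> dict[str, Optional[int]]:
--     """Single indexing pass over the header, then min-lookups per field."""
--     index: dict[str, int] = {}
--     for i, cell in enumerate(header):
--         key = cell.lower().strip()
--         if key not in index:
--             index[key] = i
--
--     def lookup(candidate_names: list[str]) -> Optional[int]:
--         hits = [index[name]
--                 for name in (c.lower().strip() for c in candidate_names)
--                 if name in index]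
--         return min(hits) if hits else None
--
--     return {
--         "transaction_date": lookup(HLB_DATE_COLUMNS),
--         "description":      lookup(HLB_DESCRIPTION_COLUMNS),
--         "debit_amount":     lookup(HLB_DEBIT_COLUMNS),
--         "credit_amount":    lookup(HLB_CREDIT_COLUMNS),
--         "amount":           None,
--         "balance":          lookup(HLB_BALANCE_COLUMNS),
--         "reference":        lookup(HLB_REFERENCE_COLUMNS),
--     }
-- ===== Notes on version B (the rewrite author's own statement) =====
-- stated objective: faster
-- what changed: B replaces A's six independent scans of the header (one per field, each with its own candidate set) by a single indexing pass that records the first header index of each normalized cell in a dict, then answers each field as the min of the recorded indices of its matching candidates.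
import Mathlib
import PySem

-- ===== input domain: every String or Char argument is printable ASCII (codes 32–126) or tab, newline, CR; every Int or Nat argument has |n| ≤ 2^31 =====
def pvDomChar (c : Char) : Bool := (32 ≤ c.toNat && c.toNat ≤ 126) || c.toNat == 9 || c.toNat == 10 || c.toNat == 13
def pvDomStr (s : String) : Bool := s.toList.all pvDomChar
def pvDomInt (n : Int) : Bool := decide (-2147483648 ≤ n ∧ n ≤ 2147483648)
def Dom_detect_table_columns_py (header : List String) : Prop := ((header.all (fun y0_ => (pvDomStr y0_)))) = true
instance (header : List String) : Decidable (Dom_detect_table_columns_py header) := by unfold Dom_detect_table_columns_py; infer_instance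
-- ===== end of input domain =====

-- B changes: one indexing pass over the header plus a min-lookup per field, instead of
-- A's six separate header scans (objective: faster by a constant factor).

def pvHLBDate : List String :=
  ["date", "transaction date", "txn date", "trans date", "value date", "posting date"]
def pvHLBDescription : List String :=
  ["transaction description", "description", "particulars", "details", "narration", "remarks"]
def pvHLBDebit : List String :=
  ["withdrawal (dr)", "withdrawal(dr)", "withdrawal", "debit", "dr", "debit (rm)", "debit amount"]
def pvHLBCredit : List String :=
  ["deposit (cr)", "deposit(cr)", "deposit", "credit", "cr", "credit (rm)", "credit amount"]
def pvHLBBalance : List String :=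
  ["balance", "running balance", "available balance", "closing balance", "balance (rm)"]
def pvHLBReference : List String :=
  ["reference", "ref", "cheque no", "cheque number", "txn ref", "transaction ref"]

-- cell.lower().strip()
def pvNorm (s : String) : String := PySem.Str.strip (PySem.Str.lower s)

-- ===== PORT A =====
-- the 'for index, cell in enumerate(header): if … return index' loop of find_index
def pvFindA (cset : PySem.Set String) : List (Int × String) → Option Int
  | [] => none
  | (i, cell) :: rest =>
      if PySem.Set.contains cset (pvNorm cell) then some i else pvFindA cset rest

def detect_table_columns_py (header : List String) : List (String × Option Int) :=
  let find_index := fun (candidate_names : List String) =>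
    pvFindA (PySem.Set.ofList (candidate_names.map (fun n => pvNorm n)))
            (PySem.List.enumerate header 0)
  [("transaction_date", find_index pvHLBDate),
   ("description",      find_index pvHLBDescription),
   ("debit_amount",     find_index pvHLBDebit),
   ("credit_amount",    find_index pvHLBCredit),
   ("amount",           none),
   ("balance",          find_index pvHLBBalance),
   ("reference",        find_index pvHLBReference)]

-- ===== PORT B =====
-- the single indexing pass: first occurrence index of each normalized header cell
def pvBuildIndex (header : List String) : PySem.Dict String Int :=
  (PySem.List.enumerate header 0).foldl
    (fun d ic => if d.contains (pvNorm ic.2) then d else d.insert (pvNorm ic.2) ic.1)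
    PySem.Dict.empty

-- hits = [index[name] for name in (c.lower().strip() for c in candidate_names) if name in index]
-- return min(hits) if hits else None
def pvLookup (d : PySem.Dict String Int) (candidate_names : List String) : Option Int :=
  let hits := candidate_names.filterMap (fun c => d.get? (pvNorm c))
  PySem.List.min? hits (fun y => y)

def detect_table_columns_py_alt (header : List String) : List (String × Option Int) :=
  let index := pvBuildIndex header
  [("transaction_date", pvLookup index pvHLBDate),
   ("description",      pvLookup index pvHLBDescription),
   ("debit_amount",     pvLookup index pvHLBDebit),
   ("credit_amount",    pvLookup index pvHLBCredit),
   ("amount",           none),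
   ("balance",          pvLookup index pvHLBBalance),
   ("reference",        pvLookup index pvHLBReference)]

-- ===== PRECONDITION & SPEC =====
def Spec_detect_table_columns_py (header : List String) (out : List (String × Option Int)) : Prop := out = detect_table_columns_py_alt header
instance (header : List String) (out : List (String × Option Int)) : Decidable (Spec_detect_table_columns_py header out) := by unfold Spec_detect_table_columns_py; infer_instance

-- ===== CLAIM (what is proved, stated in full; the proofs are below) =====
def Claim_equal_detect_table_columns_py : Prop := ∀ (header : List String), Dom_detect_table_columns_py header → Spec_detect_table_columns_py header (detect_table_columns_py header)

-- ===== LEMMAS AND PROOFS =====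

-- proof-only spec helpers: the first index ≥ s whose normalized cell matches
def pvSpec (N : List String) (s : Int) : List String → Option Int
  | [] => none
  | h :: t => if N.contains (pvNorm h) then some s else pvSpec N (s + 1) t

def pvSpecK (k : String) (s : Int) : List String → Option Int
  | [] => none
  | h :: t => if pvNorm h == k then some s else pvSpecK k (s + 1) t

theorem pvSpecK_ge (k : String) (l : List String) :
    ∀ (s v : Int), pvSpecK k s l = some v → s ≤ v := by
  induction l with
  | nil => intro s v h; simp [pvSpecK] at h
  | cons h t ih =>
      intro s v hv
      unfold pvSpecK at hv
      by_cases hb : (pvNorm h == k) = true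
      · rw [if_pos hb] at hv; injection hv with hv; omega
      · rw [if_neg hb] at hv; have := ih (s + 1) v hv; omega

theorem pvContains_ofList_map (L : List String) (x : String) :
    (PySem.Set.ofList (L.map (fun n => pvNorm n))).contains x = (L.map pvNorm).contains x := by
  rw [PySem.Set.contains_eq_listContains]
  by_cases hx : x ∈ (L.map pvNorm)
  · have h1 : x ∈ PySem.Set.ofList (L.map (fun n => pvNorm n)) := by
      rw [PySem.Set.mem_ofList]; exact hx
    rw [List.contains_iff_mem.mpr h1, List.contains_iff_mem.mpr hx]
  · have h1 : x ∉ PySem.Set.ofList (L.map (fun n => pvNorm n)) := by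
      rw [PySem.Set.mem_ofList]; exact hx
    rw [Bool.eq_iff_iff]
    simp [h1, hx]

-- A's scan, characterized (s = current enumerate counter)
theorem pvFindA_char (L : List String) (header : List String) :
    ∀ (s : Int),
    pvFindA (PySem.Set.ofList (L.map (fun n => pvNorm n))) (PySem.List.enumerate header s)
      = pvSpec (L.map pvNorm) s header := by
  induction header with
  | nil => intro s; simp [pvFindA, pvSpec, PySem.List.enumerate_nil]
  | cons h t ih =>
      intro s
      rw [PySem.List.enumerate_cons]
      unfold pvFindA pvSpec
      rw [pvContains_ofList_map]
      by_cases hp : ((L.map pvNorm).contains (pvNorm h)) = true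
      · rw [if_pos hp, if_pos hp]
      · rw [if_neg hp, if_neg hp, ih (s + 1)]

-- B's dict, characterized: lookup of k is the first header index whose normalized cell is k
theorem pvBuildIndex_char (header : List String) :
    ∀ (s : Int) (d : PySem.Dict String Int) (k : String),
    ((PySem.List.enumerate header s).foldl
        (fun d ic => if d.contains (pvNorm ic.2) then d else d.insert (pvNorm ic.2) ic.1)
        d).get? k
      = match d.get? k with
        | some v => some v
        | none => pvSpecK k s header := by
  induction header with
  | nil => intro s d k; cases hd : d.get? k <;> simp [PySem.List.enumerate_nil, hd, pvSpecK]
  | cons h t ih =>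
      intro s d k
      rw [PySem.List.enumerate_cons]
      simp only [List.foldl_cons]
      unfold pvSpecK
      by_cases hcon : d.contains (pvNorm h) = true
      · rw [if_pos hcon, ih (s + 1) d k]
        cases hd : d.get? k with
        | some v => simp
        | none =>
            have hne : (pvNorm h == k) = false := by
              rw [beq_eq_false_iff_ne]
              intro he
              rw [PySem.Dict.contains_eq_isSome_get?, he, hd] at hcon
              simp at hcon
            rw [if_neg (by simp [hne])]
      · rw [if_neg hcon, ih (s + 1)]
        by_cases hk : pvNorm h = k
        · subst hk
          rw [PySem.Dict.get?_insert_self]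
          have hd : d.get? (pvNorm h) = none := by
            rw [PySem.Dict.contains_eq_isSome_get?] at hcon
            cases hg : d.get? (pvNorm h)
            · rfl
            · rw [hg] at hcon; simp at hcon
          simp [hd]
        · rw [PySem.Dict.get?_insert_of_ne d s (Ne.symm hk)]
          cases hd : d.get? k with
          | some v => simp
          | none =>
              have hne : (pvNorm h == k) = false := by rw [beq_eq_false_iff_ne]; exact hk
              rw [if_neg (by simp [hne])]

-- min over the candidates' first-occurrence indices = first header index matching any candidate
theorem pvMin_char (L : List String) (header : List String) :
    ∀ (s : Int),
    PySem.List.min? (L.filterMap (fun c => pvSpecK (pvNorm c) s header)) (fun y => y)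
      = pvSpec (L.map pvNorm) s header := by
  induction header with
  | nil =>
      intro s
      have : (L.filterMap (fun c => pvSpecK (pvNorm c) s [])) = [] := by
        simp [pvSpecK]
      rw [this, pvSpec]
      rw [PySem.List.min?_eq_none_iff]
  | cons h t ih =>
      intro s
      unfold pvSpec
      by_cases hp : ((L.map pvNorm).contains (pvNorm h)) = true
      · -- some candidate matches the head: the min is s
        rw [if_pos hp]
        have hex : ∃ c ∈ L, pvNorm c = pvNorm h := by
          have := (List.contains_iff_mem).1 hp
          obtain ⟨c, hc, he⟩ := List.mem_map.1 this
          exact ⟨c, hc, he⟩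
        obtain ⟨c0, hc0, he0⟩ := hex
        set hits := (L.filterMap (fun c => pvSpecK (pvNorm c) s (h :: t))) with hhits
        have hs_mem : s ∈ hits := by
          rw [hhits]
          refine List.mem_filterMap.2 ⟨c0, hc0, ?_⟩
          unfold pvSpecK
          rw [if_pos (by rw [beq_iff_eq]; exact he0.symm)]
        have hge : ∀ y ∈ hits, s ≤ y := by
          intro y hy
          rw [hhits] at hy
          obtain ⟨c, _, hfc⟩ := List.mem_filterMap.1 hy
          unfold pvSpecK at hfc
          by_cases hb : (pvNorm h == pvNorm c) = true
          · rw [if_pos hb] at hfc; injection hfc with hfc; omega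
          · rw [if_neg hb] at hfc
            have := pvSpecK_ge (pvNorm c) t (s + 1) y hfc; omega
        cases hmin : PySem.List.min? hits (fun y => y) with
        | none =>
            rw [PySem.List.min?_eq_none_iff] at hmin
            rw [hmin] at hs_mem; simp at hs_mem
        | some m =>
            have hm_mem := PySem.List.min?_mem hmin
            have hle : m ≤ s := PySem.List.min?_isMin hmin s hs_mem
            have hge' := hge m hm_mem
            rw [le_antisymm hle hge']
      · -- no candidate matches the head: shift the counter and use the IH
        rw [if_neg hp]
        have hcong : ∀ c ∈ L, pvSpecK (pvNorm c) s (h :: t) = pvSpecK (pvNorm c) (s + 1) t := by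
          intro c hc
          rw [pvSpecK]
          have hne : (pvNorm h == pvNorm c) = false := by
            rw [beq_eq_false_iff_ne]
            intro he
            have hm : pvNorm c ∈ L.map pvNorm := List.mem_map.2 ⟨c, hc, rfl⟩
            rw [← he, ← List.contains_iff_mem] at hm
            exact hp hm
          rw [if_neg (by simp [hne])]
        rw [List.filterMap_congr hcong, ih (s + 1)]

-- the two field computations agree
theorem pvLookup_eq (header : List String) (L : List String) :
    pvLookup (pvBuildIndex header) L
      = pvFindA (PySem.Set.ofList (L.map (fun n => pvNorm n))) (PySem.List.enumerate header 0) := by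
  rw [pvFindA_char]
  unfold pvLookup pvBuildIndex
  have hget : ∀ c ∈ L, (((PySem.List.enumerate header 0).foldl
      (fun d ic => if d.contains (pvNorm ic.2) then d else d.insert (pvNorm ic.2) ic.1)
      PySem.Dict.empty).get? (pvNorm c)) = pvSpecK (pvNorm c) 0 header := by
    intro c _
    rw [pvBuildIndex_char header 0 PySem.Dict.empty (pvNorm c)]
    rw [PySem.Dict.get?_empty]
  rw [List.filterMap_congr hget]
  exact pvMin_char L header 0

-- ===== VERDICT (by name: the statement is the Claim_ definition above) =====
theorem detect_table_columns_py_spec : Claim_equal_detect_table_columns_py := by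
  intro header _
  unfold Spec_detect_table_columns_py detect_table_columns_py detect_table_columns_py_alt
  simp only [pvLookup_eq]
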